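-- pv_equiv track=rewrite | github.com/niemandkun/pyext | ext4/journal.py | chain_journal_map
-- ===== SOURCE A (Python) =====
-- from itertools import chain, groupby
--
-- def chain_journal_map(journal_map):
--     disc_blks = chain(*(x[0] for x in journal_map.values()))
--     jrn_blks = chain(*(x[1] for x in journal_map.values()))
--
--     sequence = dict((jrn_block, seq)
--                     for seq in journal_map
--                     for jrn_block in journal_map[seq][1])
--
--     sort_func = lambda x: x[0]
--     block_pairs = sorted(zip(disc_blks, jrn_blks), key=sort_func)
--     return dict((disc_blk, sorted([jrn_blk for _, jrn_blk in jrn_blks],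
--                            key=lambda blk: sequence[blk], reverse=True))
--                 for disc_blk, jrn_blks in groupby(block_pairs, sort_func))
-- ===== SOURCE B (Python) =====
-- def chain_journal_map(journal_map):
--     sequence = {b: seq for seq, (_, jb) in journal_map.items() for b in jb}
--     disc_all = [d for ds, _ in journal_map.values() for d in ds]
--     jrn_all = [j for _, js in journal_map.values() for j in js]
--     groups = {}
--     for d, j in zip(disc_all, jrn_all):
--         groups.setdefault(d, []).append(j)
--     return {d: sorted(groups[d], key=sequence.__getitem__, reverse=True)
--             for d in sorted(groups)}
-- ===== Notes on version B (the rewrite author's own statement) =====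
-- stated objective: faster
-- what changed: Replaces the global sort of all (disc, jrn) pairs plus itertools.groupby with a single-pass hash grouping into a dict of lists, then emits groups over the sorted (much shorter) distinct-key list; the per-group descending sort by sequence is kept.
import Mathlib
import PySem

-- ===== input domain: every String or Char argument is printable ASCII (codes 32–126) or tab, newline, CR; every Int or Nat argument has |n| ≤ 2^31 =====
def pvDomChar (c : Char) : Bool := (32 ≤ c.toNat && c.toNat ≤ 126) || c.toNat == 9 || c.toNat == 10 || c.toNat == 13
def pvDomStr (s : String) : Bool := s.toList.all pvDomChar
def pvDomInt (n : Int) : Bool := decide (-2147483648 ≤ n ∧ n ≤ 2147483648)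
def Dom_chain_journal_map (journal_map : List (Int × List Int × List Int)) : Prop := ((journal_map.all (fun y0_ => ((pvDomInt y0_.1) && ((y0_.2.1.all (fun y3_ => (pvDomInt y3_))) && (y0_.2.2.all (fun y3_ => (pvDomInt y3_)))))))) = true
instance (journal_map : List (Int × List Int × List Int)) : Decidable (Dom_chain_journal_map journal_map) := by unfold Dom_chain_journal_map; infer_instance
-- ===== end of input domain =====

-- B replaces A's global sort of all (disc, jrn) pairs + itertools.groupby by a one-pass dict
-- grouping followed by a sort of the distinct keys (objective: simpler; same outputs).

-- ===== PORT A =====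
-- journal_map[seq] : Python dict lookup, first match (KeyError impossible: seq iterates the dict's own keys)
def pyJmLookup (journal_map : List (Int × List Int × List Int)) (k : Int) : List Int × List Int :=
  (PySem.Dict.mk journal_map).getD k ([], [])

-- itertools.groupby(block_pairs, key=lambda x: x[0]) consumed into (key, list(group)) pairs:
-- consecutive runs of pairs with equal first component (each group fully consumed in order; exact)
def pyGroupby : List (Int × Int) → List (Int × List (Int × Int))
  | [] => []
  | p :: rest =>
      (p.1, p :: rest.takeWhile (fun q => q.1 == p.1)) ::
        pyGroupby (rest.dropWhile (fun q => q.1 == p.1))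
termination_by l => l.length
decreasing_by simpa using Nat.lt_succ_of_le (List.length_dropWhile_le _ _)

def chain_journal_map (journal_map : List (Int × List Int × List Int)) : List (Int × List Int) :=
  let disc_blks := (journal_map.map (fun x => x.2.1)).flatten
  let jrn_blks := (journal_map.map (fun x => x.2.2)).flatten
  let sequence : PySem.Dict Int Int :=
    journal_map.foldl (fun d e =>
      ((pyJmLookup journal_map e.1).2).foldl (fun d b => d.insert b e.1) d) PySem.Dict.empty
  let block_pairs := PySem.List.sorted (disc_blks.zip jrn_blks) (fun x => x.1) false
  -- dict(...) over groupby of a key-sorted list: the group keys are pairwise distinct, so the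
  -- association list IS the dict (exact); sequence[blk]: blk is always a key, so getD _ 0 is exact
  (pyGroupby block_pairs).map (fun g =>
    (g.1, PySem.List.sorted (g.2.map (fun q => q.2)) (fun blk => sequence.getD blk 0) true))

-- ===== PORT B =====
def chain_journal_map_alt (journal_map : List (Int × List Int × List Int)) : List (Int × List Int) :=
  let sequence : PySem.Dict Int Int :=
    journal_map.foldl (fun d e => e.2.2.foldl (fun d b => d.insert b e.1) d) PySem.Dict.empty
  let disc_all := journal_map.flatMap (fun e => e.2.1)
  let jrn_all := journal_map.flatMap (fun e => e.2.2)
  -- groups.setdefault(d, []).append(j)  ==  groups[d] = groups.get(d, []) + [j]  ==  Dict.modify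
  let groups : PySem.Dict Int (List Int) :=
    (disc_all.zip jrn_all).foldl (fun d p => d.modify p.1 [] (fun l => l ++ [p.2])) PySem.Dict.empty
  -- sequence.__getitem__: every grouped block is a key of sequence, so getD _ 0 is exact
  (PySem.List.sorted groups.keys (fun k => k) false).map (fun d =>
    (d, PySem.List.sorted (groups.getD d []) (fun b => sequence.getD b 0) true))

-- ===== PRECONDITION & SPEC =====
-- journal_map is a Python dict, so its keys are necessarily distinct; Pre_ only excludes
-- association lists with duplicate keys, which no Python call can produce.
def Pre_chain_journal_map (journal_map : List (Int × List Int × List Int)) : Prop :=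
  (journal_map.map (fun e => e.1)).Nodup
instance (journal_map : List (Int × List Int × List Int)) : Decidable (Pre_chain_journal_map journal_map) := by unfold Pre_chain_journal_map; infer_instance

def pvWitness_chain_journal_map : (List (Int × List Int × List Int)) :=
  [(7, [10, 11], [20, 21]), (3, [10], [22])]

def Spec_chain_journal_map (journal_map : List (Int × List Int × List Int)) (out : List (Int × List Int)) : Prop := out = chain_journal_map_alt journal_map
instance (journal_map : List (Int × List Int × List Int)) (out : List (Int × List Int)) : Decidable (Spec_chain_journal_map journal_map out) := by unfold Spec_chain_journal_map; infer_instance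

-- ===== CLAIM (what is proved, stated in full; the proofs are below) =====
def Claim_equal_chain_journal_map : Prop := ∀ (journal_map : List (Int × List Int × List Int)), Dom_chain_journal_map journal_map → Pre_chain_journal_map journal_map → Spec_chain_journal_map journal_map (chain_journal_map journal_map)

-- ===== LEMMAS AND PROOFS =====

-- The two `sequence` dicts coincide when the keys of journal_map are distinct.
theorem seq_dict_eq (jm : List (Int × List Int × List Int))
    (h : (jm.map (fun e => e.1)).Nodup) :
    jm.foldl (fun d e => ((pyJmLookup jm e.1).2).foldl (fun d b => d.insert b e.1) d)
        PySem.Dict.empty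
      = jm.foldl (fun d e => e.2.2.foldl (fun d b => d.insert b e.1) d) PySem.Dict.empty := by
  apply PySem.List.foldl_congr_mem
  intro acc e he
  have hmem : (e.1, e.2) ∈ (PySem.Dict.mk jm).items := by simpa using he
  have hk : (PySem.Dict.mk jm).keys.Nodup := by simpa [PySem.Dict.keys] using h
  have hlk : pyJmLookup jm e.1 = e.2 := by
    simp only [pyJmLookup]
    exact PySem.Dict.getD_of_mem_items _ hmem hk ([], [])
  rw [hlk]

theorem filter_insertBy (k : Int) (x : Int × Int) (ys : List (Int × Int))
    (hs : ys.Pairwise (fun a b => a.1 ≤ b.1)) :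
    (PySem.List.insertBy (fun a b => decide (a.1 < b.1)) x ys).filter (fun p => p.1 == k)
      = ys.filter (fun p => p.1 == k) ++ (if x.1 == k then [x] else []) := by
  induction ys with
  | nil =>
    by_cases hxk : x.1 = k <;> simp [PySem.List.insertBy, hxk]
  | cons y ys ih =>
    rw [List.pairwise_cons] at hs
    simp only [PySem.List.insertBy]
    by_cases hb : x.1 < y.1
    · rw [if_pos (by simpa using hb)]
      by_cases hxk : x.1 = k
      · have hnil : (y :: ys).filter (fun p => p.1 == k) = [] := by
          apply List.filter_eq_nil_iff.mpr
          intro z hz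
          rcases List.mem_cons.mp hz with h1 | h1
          · subst h1; simp; omega
          · have := hs.1 z h1; simp; omega
        rw [List.filter_cons_of_pos (by simpa using hxk), hnil]
        simp [hxk]
      · rw [List.filter_cons_of_neg (by simpa using hxk)]
        simp [hxk]
    · rw [if_neg (by simpa using hb)]
      rw [List.filter_cons, ih hs.2, List.filter_cons]
      split <;> simp

theorem filter_sorted (xs : List (Int × Int)) (k : Int) :
    (PySem.List.sorted xs (fun p => p.1) false).filter (fun p => p.1 == k)
      = xs.filter (fun p => p.1 == k) := by
  induction xs using List.reverseRecOn with
  | nil => simp [PySem.List.sorted]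
  | append_singleton l x ih =>
    rw [PySem.List.sorted_eq_foldl_insertBy, List.foldl_append, List.foldl_cons, List.foldl_nil,
      ← PySem.List.sorted_eq_foldl_insertBy]
    rw [filter_insertBy k x _ (PySem.List.sorted_pairwise l (fun p => p.1)), ih,
      List.filter_append, List.filter_cons]
    split <;> simp

theorem drop_gt (p : Int × Int) (rest : List (Int × Int))
    (hs : (p :: rest).Pairwise (fun a b => a.1 ≤ b.1)) :
    ∀ x ∈ rest.dropWhile (fun q => q.1 == p.1), p.1 < x.1 := by
  rw [List.pairwise_cons] at hs
  intro x hx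
  rcases hd : rest.dropWhile (fun q => q.1 == p.1) with _ | ⟨b, r⟩
  · simp [hd] at hx
  · have hb : ¬ (b.1 == p.1) = true := by
      have := List.head_dropWhile_not (p := fun q => (q : Int × Int).1 == p.1) (l := rest) (by rw [hd]; simp)
      simpa [hd] using this
    have hbp : p.1 < b.1 := by
      have hbmem : b ∈ rest := (List.dropWhile_sublist _).mem (by rw [hd]; simp)
      have := hs.1 b hbmem
      simp at hb; omega
    rw [hd] at hx
    rcases List.mem_cons.mp hx with h1 | h1
    · rw [h1]; omega
    · have hpw : (b :: r).Pairwise (fun a b => a.1 ≤ b.1) := by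
        have := hs.2.sublist (List.dropWhile_sublist (l := rest) (p := fun q : Int × Int => q.1 == p.1))
        rwa [hd] at this
      have := (List.pairwise_cons.mp hpw).1 x h1
      omega

theorem pyGroupby_keys_mem (s : List (Int × Int)) (k : Int) :
    k ∈ (pyGroupby s).map (fun g => g.1) ↔ k ∈ s.map (fun x => x.1) := by
  induction s using pyGroupby.induct with
  | case1 => simp [pyGroupby]
  | case2 p rest ih =>
    rw [pyGroupby]
    have hsplit : rest = rest.takeWhile (fun q => q.1 == p.1) ++ rest.dropWhile (fun q => q.1 == p.1) :=
      (List.takeWhile_append_dropWhile).symm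
    conv_rhs => rw [hsplit]
    simp only [List.map_cons, List.map_append, List.mem_cons, List.mem_append, ih, List.mem_map]
    constructor
    · rintro (h | h)
      · exact Or.inl h
      · exact Or.inr (Or.inr h)
    · rintro (h | ⟨x, hx, hxk⟩ | h)
      · exact Or.inl h
      · have : (x.1 == p.1) = true := List.mem_takeWhile_imp (p := fun q : Int × Int => q.1 == p.1) hx
        simp at this
        exact Or.inl (by omega)
      · exact Or.inr h

theorem pyGroupby_snd (s : List (Int × Int)) (hs : s.Pairwise (fun a b => a.1 ≤ b.1)) :
    ∀ g ∈ pyGroupby s, g.2 = s.filter (fun x => x.1 == g.1) := by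
  induction s using pyGroupby.induct with
  | case1 => intro g hg; simp [pyGroupby] at hg
  | case2 p rest ih =>
    intro g hg
    have hs' : (rest.dropWhile (fun q => q.1 == p.1)).Pairwise (fun a b => a.1 ≤ b.1) :=
      (List.pairwise_cons.mp hs).2.sublist (List.dropWhile_sublist _)
    rw [pyGroupby] at hg
    have hsplit : rest = rest.takeWhile (fun q => q.1 == p.1) ++ rest.dropWhile (fun q => q.1 == p.1) :=
      (List.takeWhile_append_dropWhile).symm
    rcases List.mem_cons.mp hg with h1 | h1
    · subst h1
      simp only
      rw [List.filter_cons_of_pos (by simp)]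
      conv_rhs => rw [hsplit]
      rw [List.filter_append]
      have h2 : (rest.takeWhile (fun q => q.1 == p.1)).filter (fun x => x.1 == p.1)
          = rest.takeWhile (fun q => q.1 == p.1) := by
        apply List.filter_eq_self.mpr
        intro a ha; exact List.mem_takeWhile_imp (p := fun q : Int × Int => q.1 == p.1) ha
      have h3 : (rest.dropWhile (fun q => q.1 == p.1)).filter (fun x => x.1 == p.1) = [] := by
        apply List.filter_eq_nil_iff.mpr
        intro a ha
        have := drop_gt p rest hs a ha
        simp; omega
      rw [h2, h3, List.append_nil]
    · have IH := ih hs' g h1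
      rw [IH]
      -- g.1 is a key strictly above p.1: the prefix contributes nothing
      have hgk : p.1 < g.1 := by
        have hmem : g.1 ∈ (rest.dropWhile (fun q => q.1 == p.1)).map (fun x => x.1) :=
          (pyGroupby_keys_mem _ _).mp (List.mem_map_of_mem h1)
        rcases List.mem_map.mp hmem with ⟨x, hx, hxk⟩
        have := drop_gt p rest hs x hx
        omega
      conv_rhs => rw [hsplit]
      rw [List.filter_cons_of_neg (by simp; omega), List.filter_append]
      have h2 : (rest.takeWhile (fun q => q.1 == p.1)).filter (fun x => x.1 == g.1) = [] := by
        apply List.filter_eq_nil_iff.mpr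
        intro a ha
        have := List.mem_takeWhile_imp (p := fun q : Int × Int => q.1 == p.1) ha
        simp at this ⊢; omega
      rw [h2, List.nil_append]

theorem pyGroupby_keys_lt (s : List (Int × Int)) (hs : s.Pairwise (fun a b => a.1 ≤ b.1)) :
    ((pyGroupby s).map (fun g => g.1)).Pairwise (· < ·) := by
  induction s using pyGroupby.induct with
  | case1 => simp [pyGroupby]
  | case2 p rest ih =>
    have hs' : (rest.dropWhile (fun q => q.1 == p.1)).Pairwise (fun a b => a.1 ≤ b.1) :=
      (List.pairwise_cons.mp hs).2.sublist (List.dropWhile_sublist _)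
    rw [pyGroupby, List.map_cons, List.pairwise_cons]
    refine ⟨?_, ih hs'⟩
    intro k hk
    rcases List.mem_map.mp ((pyGroupby_keys_mem _ _).mp hk) with ⟨x, hx, hxk⟩
    have := drop_gt p rest hs x hx
    simp only at *
    omega

-- ===== VERDICT (by name: the statement is the Claim_ definition above) =====
theorem chain_journal_map_spec : Claim_equal_chain_journal_map := by
  intro jm _hdom hpre
  show chain_journal_map jm = chain_journal_map_alt jm
  simp only [chain_journal_map, chain_journal_map_alt, List.flatMap_def]
  rw [seq_dict_eq jm hpre]
  set seqd := jm.foldl (fun d e => e.2.2.foldl (fun d b => d.insert b e.1) d) PySem.Dict.empty with hseqd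
  set pairs := ((jm.map fun x => x.2.1).flatten).zip ((jm.map fun x => x.2.2).flatten) with hpairs
  set s := PySem.List.sorted pairs (fun x => x.1) false with hsdef
  set groups := pairs.foldl (fun d p => d.modify p.1 [] (fun l => l ++ [p.2])) PySem.Dict.empty with hgroups
  have hsort : s.Pairwise (fun a b => a.1 ≤ b.1) := PySem.List.sorted_pairwise pairs (fun x => x.1)
  -- the dict of groups: keys and per-key contents
  have hkeys : groups.keys = PySem.Set.ofList (pairs.map (fun p => p.1)) := by
    rw [hgroups, PySem.Dict.keys_foldl_modify_key pairs (fun p => p.1) [] (fun _ p => fun l => l ++ [p.2])]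
    simp [PySem.Set.update, PySem.Set.ofList_eq_foldl]
  have hgetD : ∀ k, groups.getD k [] = (pairs.filter (fun p => p.1 == k)).map (fun p => p.2) := by
    intro k
    rw [hgroups, PySem.Dict.getD_foldl_modify_append pairs PySem.Dict.empty k]
    simp
  -- the sorted distinct keys are exactly groupby's key list
  have hK : PySem.List.sorted groups.keys (fun k => k) false = (pyGroupby s).map (fun g => g.1) := by
    rw [hkeys]
    apply PySem.List.sorted_eq_of_perm_of_pairwise_lt
    · rw [List.perm_ext_iff_of_nodup ((pyGroupby_keys_lt s hsort).imp (fun h => ne_of_lt h))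
        (PySem.Set.nodup_ofList _)]
      intro k
      rw [pyGroupby_keys_mem s k, PySem.Set.mem_ofList]
      exact ((PySem.List.sorted_perm pairs (fun x => x.1) false).map (fun x => x.1)).mem_iff
    · exact pyGroupby_keys_lt s hsort
  -- each group row equals the dict row for its key
  have hrow : ∀ g ∈ pyGroupby s,
      (g.1, PySem.List.sorted (g.2.map (fun q => q.2)) (fun blk => seqd.getD blk 0) true)
        = (g.1, PySem.List.sorted (groups.getD g.1 []) (fun b => seqd.getD b 0) true) := by
    intro g hg
    rw [hgetD g.1, ← filter_sorted pairs g.1, ← hsdef, ← pyGroupby_snd s hsort g hg]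
  rw [List.map_congr_left hrow, hK, List.map_map]
  rfl
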